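-- pv_equiv track=rewrite | github.com/HugoLeda/EstruturaDeDados | CalculoDac/b.py | gerarModulo10
-- ===== SOURCE A (Python) =====
-- def gerarModulo10(sequencia: list):
--   modulo10 = [0] * len(sequencia)
--
--   n = 2
--   for i in range(len(sequencia) - 1, -1, -1):
--     modulo10[i] = n
--     if (n == 2):
--       n = 1
--     else:
--       n = 2
--
--   return modulo10
-- ===== SOURCE B (Python) =====
-- def gerarModulo10(sequencia: list):
--   n = len(sequencia)
--   return [2 if (n - 1 - i) % 2 == 0 else 1 for i in range(n)]
-- ===== Notes on version B (the rewrite author's own statement) =====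
-- stated objective: simpler
-- what changed: Replaces the backwards loop that threads a mutable toggling state over a preallocated array with a forward comprehension computing each element directly from its distance-from-end parity (closed form, no mutable state).
import Mathlib
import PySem

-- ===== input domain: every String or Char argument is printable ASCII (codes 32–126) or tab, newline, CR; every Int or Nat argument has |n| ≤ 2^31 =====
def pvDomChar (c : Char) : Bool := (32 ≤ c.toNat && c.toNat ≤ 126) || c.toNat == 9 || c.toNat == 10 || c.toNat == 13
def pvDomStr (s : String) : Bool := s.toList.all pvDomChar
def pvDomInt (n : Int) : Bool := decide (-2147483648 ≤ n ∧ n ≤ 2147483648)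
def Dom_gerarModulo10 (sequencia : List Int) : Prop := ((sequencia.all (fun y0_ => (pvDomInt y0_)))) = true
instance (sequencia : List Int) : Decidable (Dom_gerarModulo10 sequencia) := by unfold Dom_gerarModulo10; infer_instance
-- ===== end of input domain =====

-- B replaces A's backwards loop with a mutable 2/1 toggle by a forward map computing each
-- element from its distance-from-end parity (objective: simpler).


-- ===== PORT A =====
-- A: allocate [0]*len, walk indices from len-1 down to 0, writing a toggling 2/1 value.
def gerarModulo10 (sequencia : List Int) : List Int :=
  ((PySem.List.pyRange (PySem.List.len sequencia - 1) (-1) (-1)).foldl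
    (fun (st : List Int × Int) i =>
      (PySem.List.pySetD st.1 i st.2, if st.2 = 2 then 1 else 2))
    (List.replicate sequencia.length 0, 2)).1

-- ===== PORT B =====
-- B: each element computed directly from its index: 2 iff the distance from the end is even.
def gerarModulo10_alt (sequencia : List Int) : List Int :=
  (PySem.List.pyRange 0 (PySem.List.len sequencia) 1).map
    (fun i => if PySem.Int.mod (PySem.List.len sequencia - 1 - i) 2 = 0 then (2 : Int) else 1)

-- ===== PRECONDITION & SPEC =====
def Spec_gerarModulo10 (sequencia : List Int) (out : List Int) : Prop := out = gerarModulo10_alt sequencia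
instance (sequencia : List Int) (out : List Int) : Decidable (Spec_gerarModulo10 sequencia out) := by unfold Spec_gerarModulo10; infer_instance

-- ===== CLAIM (what is proved, stated in full; the proofs are below) =====
def Claim_equal_gerarModulo10 : Prop := ∀ (sequencia : List Int), Dom_gerarModulo10 sequencia → Spec_gerarModulo10 sequencia (gerarModulo10 sequencia)

-- ===== LEMMAS AND PROOFS =====

-- the descending range of A's loop unfolds one step at the top
theorem pyRange_negone_cons (a : Int) (h : 0 ≤ a) :
    PySem.List.pyRange a (-1) (-1) = a :: PySem.List.pyRange (a - 1) (-1) (-1) := by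
  simp only [PySem.List.pyRange, Int.reduceNeg, neg_eq_zero, one_ne_zero, ↓reduceIte, neg_mul,
    one_mul, Int.neg_pos, Int.reduceLT, sub_neg_eq_add, neg_neg, add_sub_cancel_right,
    EuclideanDomain.div_one, neg_lt_sub_iff_lt_add, lt_add_iff_pos_right, sub_add_cancel]
  have h1 : (if -1 < a then (a + 1).toNat else 0) = a.toNat + 1 := by
    rw [if_pos (by omega)]; omega
  rw [h1, List.range_succ_eq_map, List.map_cons, List.map_map]
  rcases eq_or_lt_of_le h with rfl | hpos
  · simp
  · rw [if_pos hpos]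
    simp only [Nat.cast_zero, neg_zero, add_zero]
    congr 1
    apply List.map_congr_left
    intro k _
    simp only [Function.comp_apply, Nat.succ_eq_add_one]
    push_cast
    ring

-- the A-side loop characterized: positions 0..k get the alternating value, the rest untouched
theorem loopA_char (k : Nat) (f : Int) (hf : f = 1 ∨ f = 2) (arr : List Int)
    (h : k < arr.length) :
    ((PySem.List.pyRange (k : Int) (-1) (-1)).foldl
      (fun (st : List Int × Int) i =>
        (PySem.List.pySetD st.1 i st.2, if st.2 = 2 then 1 else 2))
      (arr, f)).1
    = (List.range (k + 1)).map (fun i => if (k - i) % 2 = 0 then f else if f = 2 then 1 else 2)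
        ++ arr.drop (k + 1) := by
  induction k generalizing f arr with
  | zero =>
    simp only [Nat.cast_zero]
    rw [pyRange_negone_cons 0 (by omega)]
    rw [(by decide : ((0 : Int) - 1) = -1), (by decide : PySem.List.pyRange (-1) (-1) (-1) = [])]
    simp only [List.foldl_cons, List.foldl_nil]
    rw [PySem.List.pySetD_of_nonneg arr f (by omega)]
    cases arr with
    | nil => simp at h
    | cons x xs => simp
  | succ k ih =>
    push_cast
    rw [pyRange_negone_cons ((k : Int) + 1) (by omega)]
    rw [(by ring : ((k : Int) + 1 - 1) = (k : Int))]
    simp only [List.foldl_cons]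
    have hset : PySem.List.pySetD arr ((k : Int) + 1) f = arr.set (k + 1) f := by
      rw [(by push_cast; ring : ((k : Int) + 1) = ((k + 1 : Nat) : Int)),
          PySem.List.pySetD_natCast]
    rw [hset]
    rw [ih (if f = 2 then 1 else 2) (by split_ifs <;> simp) _ (by simp; omega)]
    have hdrop : (arr.set (k + 1) f).drop (k + 1) = f :: arr.drop (k + 2) := by
      rw [List.drop_eq_getElem_cons (by simp only [List.length_set]; omega)]
      rw [List.getElem_set_self (by simp only [List.length_set]; omega)]
      rw [List.drop_set_of_lt (by omega)]
    rw [hdrop, List.range_succ (n := k + 1), List.map_append]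
    simp only [List.map_cons, List.map_nil, Nat.sub_self, Nat.zero_mod]
    rw [List.append_assoc, List.singleton_append]
    congr 1
    apply List.map_congr_left
    intro i hi
    simp only [List.mem_range] at hi
    rcases hf with rfl | rfl <;> norm_num <;> split_ifs <;> omega

-- ===== VERDICT (by name: the statement is the Claim_ definition above) =====
theorem gerarModulo10_spec : Claim_equal_gerarModulo10 := by
  unfold Claim_equal_gerarModulo10
  intro s _
  unfold Spec_gerarModulo10 gerarModulo10 gerarModulo10_alt
  obtain ⟨n, hn⟩ : ∃ n, s.length = n := ⟨_, rfl⟩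
  simp only [PySem.List.len_eq, hn]
  cases n with
  | zero =>
    simp only [Nat.cast_zero]
    rw [(by decide : ((0 : Int) - 1) = -1), (by decide : PySem.List.pyRange (-1) (-1) (-1) = []),
        (by decide : PySem.List.pyRange 0 0 1 = [])]
    simp
  | succ m =>
    rw [(by push_cast; ring : (((m + 1 : Nat) : Int) - 1) = (m : Int))]
    rw [loopA_char m 2 (Or.inr rfl) _ (by simp)]
    rw [PySem.List.pyRange_zero_natCast, List.map_map]
    simp only [List.drop_replicate, Nat.sub_self, List.replicate_zero, List.append_nil]
    apply List.map_congr_left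
    intro i hi
    simp only [List.mem_range] at hi
    simp only [Function.comp_apply]
    rw [PySem.Int.mod_eq_emod_of_pos (by omega)]
    split_ifs <;> omega
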